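-- pv_equiv track=rewrite | github.com/thamiresfalbo/mooc-fi-programming-2023 | part05-07_sudoku_grid/src/sudoku_grid.py | column_correct
-- ===== SOURCE A (Python) =====
-- def column_correct(sudoku: list, column_no: int):
--     my_col = [row[column_no] for row in sudoku]
--     for i in my_col:
--         if i == 0:
--             pass
--         elif my_col.count(i) > 1:
--             return False
--     return True
-- ===== SOURCE B (Python) =====
-- def column_correct(sudoku: list, column_no: int):
--     col = [row[column_no] for row in sudoku]
--     nz = [x for x in col if x != 0]
--     return len(nz) == len(set(nz))
-- ===== Notes on version B (the rewrite author's own statement) =====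
-- stated objective: simpler
-- what changed: Replaces the scan with an inner count and early return by building the nonzero column entries once and comparing the list's length against its set's cardinality.
import Mathlib
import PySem

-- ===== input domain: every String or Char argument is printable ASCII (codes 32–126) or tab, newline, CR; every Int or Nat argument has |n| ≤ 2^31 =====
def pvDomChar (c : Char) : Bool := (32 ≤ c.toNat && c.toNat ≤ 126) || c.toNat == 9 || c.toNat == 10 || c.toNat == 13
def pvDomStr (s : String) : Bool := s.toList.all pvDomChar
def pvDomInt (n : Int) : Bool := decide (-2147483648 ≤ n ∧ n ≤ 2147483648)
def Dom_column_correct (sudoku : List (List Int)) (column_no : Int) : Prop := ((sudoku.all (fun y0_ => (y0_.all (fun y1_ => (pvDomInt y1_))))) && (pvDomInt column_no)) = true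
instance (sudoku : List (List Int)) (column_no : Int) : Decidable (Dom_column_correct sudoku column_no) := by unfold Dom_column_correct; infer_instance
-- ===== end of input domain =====

-- B replaces A's scan-with-inner-count-and-early-return by building the nonzero column entries once
-- and comparing the list's length with its set's cardinality (objective: simpler).


-- ===== PORT A =====
-- my_col = [row[column_no] for row in sudoku]  (none = some row raised IndexError)
def pvColOf (sudoku : List (List Int)) (column_no : Int) : Option (List Int) :=
  match sudoku with
  | [] => some []
  | row :: rest =>
    match PySem.List.pyGet? row column_no, pvColOf rest column_no with
    | some v, some vs => some (v :: vs)
    | _, _ => none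

-- for i in my_col: if i == 0: pass; elif my_col.count(i) > 1: return False
def pvLoopA (full : List Int) : List Int → Bool
  | [] => true
  | i :: rest =>
    if i = 0 then pvLoopA full rest
    else if 1 < PySem.List.count full i then false
    else pvLoopA full rest

def column_correct (sudoku : List (List Int)) (column_no : Int) : Bool :=
  match pvColOf sudoku column_no with
  | none => false            -- Python raises IndexError here; excluded by Pre_
  | some my_col => pvLoopA my_col my_col

-- ===== PORT B =====
def column_correct_alt (sudoku : List (List Int)) (column_no : Int) : Bool :=
  match pvColOf sudoku column_no with
  | none => false            -- Python raises IndexError here; excluded by Pre_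
  | some col =>
    let nz := col.filter (fun x => !(x == 0))
    decide (nz.length = (PySem.Set.ofList nz).length)

-- ===== PRECONDITION & SPEC =====
-- Pre_: every row admits column_no as an index (otherwise the comprehension raises IndexError)
def Pre_column_correct (sudoku : List (List Int)) (column_no : Int) : Prop :=
  ∀ row ∈ sudoku, PySem.Raise.InRange row.length column_no
instance (sudoku : List (List Int)) (column_no : Int) : Decidable (Pre_column_correct sudoku column_no) := by unfold Pre_column_correct; infer_instance
def pvWitness_column_correct : List (List Int) × Int := ([[1, 0], [2, 0]], 0)
def Spec_column_correct (sudoku : List (List Int)) (column_no : Int) (out : Bool) : Prop := out = column_correct_alt sudoku column_no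
instance (sudoku : List (List Int)) (column_no : Int) (out : Bool) : Decidable (Spec_column_correct sudoku column_no out) := by unfold Spec_column_correct; infer_instance

-- ===== CLAIM (what is proved, stated in full; the proofs are below) =====
def Claim_equal_column_correct : Prop := ∀ (sudoku : List (List Int)) (column_no : Int), Dom_column_correct sudoku column_no → Pre_column_correct sudoku column_no → Spec_column_correct sudoku column_no (column_correct sudoku column_no)

-- ===== LEMMAS AND PROOFS =====

theorem pvLoopA_eq_true_iff (full : List Int) (l : List Int) :
    pvLoopA full l = true ↔ ∀ x ∈ l, x ≠ 0 → full.count x ≤ 1 := by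
  induction l with
  | nil => simp [pvLoopA]
  | cons i rest ih =>
    simp only [pvLoopA, PySem.List.count_eq]
    split_ifs with h0 hc
    · simp [ih, h0]
    · simp only [false_iff]
      intro h
      exact absurd (h i (by simp) h0) (by omega)
    · simp only [ih, List.mem_cons]
      constructor
      · rintro h x (rfl | hx) hne
        · omega
        · exact h x hx hne
      · intro h x hx hne; exact h x (Or.inr hx) hne

theorem pvNodup_filter_iff (col : List Int) :
    (col.filter (fun x => !(x == 0))).Nodup ↔ ∀ x ∈ col, x ≠ 0 → col.count x ≤ 1 := by
  rw [List.nodup_iff_count_le_one]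
  constructor
  · intro h x hx hne
    have := h x
    rwa [List.count_filter (by simp [hne])] at this
  · intro h x
    by_cases hne : x = 0
    · subst hne
      have : (0 : Int) ∉ col.filter (fun x => !(x == 0)) := by simp
      simp [List.count_eq_zero_of_not_mem this]
    · rw [List.count_filter (by simp [hne])]
      by_cases hx : x ∈ col
      · exact h x hx hne
      · simp [List.count_eq_zero_of_not_mem hx]

theorem pvOfList_length_eq_iff (xs : List Int) :
    (xs.length = (PySem.Set.ofList xs).length) ↔ xs.Nodup := by
  have hmem : (PySem.Set.ofList xs).toFinset = xs.toFinset := by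
    apply Finset.ext; intro a; simp [PySem.Set.mem_ofList]
  have h2 : (PySem.Set.ofList xs).length = xs.toFinset.card := by
    rw [← hmem]
    exact (List.toFinset_card_of_nodup (PySem.Set.nodup_ofList xs)).symm
  rw [h2]
  constructor
  · intro h
    exact Multiset.toFinset_card_eq_card_iff_nodup.mp (by simpa using h.symm)
  · intro h
    exact ((List.toFinset_card_of_nodup h)).symm

theorem pvCol_agrees (col : List Int) :
    pvLoopA col col
      = decide ((col.filter (fun x => !(x == 0))).length
          = (PySem.Set.ofList (col.filter (fun x => !(x == 0)))).length) := by
  rw [Bool.eq_iff_iff, pvLoopA_eq_true_iff, decide_eq_true_iff,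
      pvOfList_length_eq_iff, pvNodup_filter_iff]

-- ===== VERDICT (by name: the statement is the Claim_ definition above) =====
theorem pvColOf_isSome (sudoku : List (List Int)) (column_no : Int)
    (hpre : Pre_column_correct sudoku column_no) : (pvColOf sudoku column_no).isSome := by
  induction sudoku with
  | nil => simp [pvColOf]
  | cons row rest ih =>
    have h1 : PySem.List.pyGet? row column_no ≠ none := by
      simp only [ne_eq, PySem.List.pyGet?_eq_none_iff, not_not]
      exact hpre row (by simp)
    have h2 := ih (fun r hr => hpre r (by simp [hr]))
    simp only [pvColOf]
    cases hg : PySem.List.pyGet? row column_no with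
    | none => exact absurd hg h1
    | some v =>
      cases hc : pvColOf rest column_no with
      | none => rw [hc] at h2; simp at h2
      | some vs => simp

theorem column_correct_spec : Claim_equal_column_correct := by
  intro sudoku column_no _ hpre
  unfold Spec_column_correct column_correct column_correct_alt
  cases h : pvColOf sudoku column_no with
  | none => exact absurd (h ▸ pvColOf_isSome sudoku column_no hpre) (by simp)
  | some col => exact pvCol_agrees col
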